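-- pv_equiv track=rewrite | github.com/untergunter/Chess-documentation | main.py | split_list_by_cluster_indexes
-- ===== SOURCE A (Python) =====
-- def split_list_by_cluster_indexes(points, cluster_indexes):
--     clusters = {}
--     for i, val in enumerate(cluster_indexes):
--         if (val not in clusters):
--             clusters[val] = []
--         clusters[val].append(points[i])
--     for key in clusters.copy().keys():
--         if (len(clusters[key]) < 3):
--             del clusters[key]
--     return clusters
-- ===== SOURCE B (Python) =====
-- def split_list_by_cluster_indexes(points, cluster_indexes):
--     # per-key gather: for each distinct index (first-appearance order) scan the
--     # whole list for its members; keep gatherings of size >= 3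
--     result = {}
--     for key in dict.fromkeys(cluster_indexes):
--         members = [points[i] for i, v in enumerate(cluster_indexes) if v == key]
--         if len(members) >= 3:
--             result[key] = members
--     return result
-- ===== Notes on version B (the rewrite author's own statement) =====
-- stated objective: alternative
-- what changed: B drops A's single-pass grouping dict and deletion pass entirely: it iterates over the distinct cluster indexes (dict.fromkeys, first-appearance order) and for each key rescans the whole list gathering its points, keeping gatherings of size >= 3 (per-key nested scan instead of one-pass accumulation).
import Mathlib
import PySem

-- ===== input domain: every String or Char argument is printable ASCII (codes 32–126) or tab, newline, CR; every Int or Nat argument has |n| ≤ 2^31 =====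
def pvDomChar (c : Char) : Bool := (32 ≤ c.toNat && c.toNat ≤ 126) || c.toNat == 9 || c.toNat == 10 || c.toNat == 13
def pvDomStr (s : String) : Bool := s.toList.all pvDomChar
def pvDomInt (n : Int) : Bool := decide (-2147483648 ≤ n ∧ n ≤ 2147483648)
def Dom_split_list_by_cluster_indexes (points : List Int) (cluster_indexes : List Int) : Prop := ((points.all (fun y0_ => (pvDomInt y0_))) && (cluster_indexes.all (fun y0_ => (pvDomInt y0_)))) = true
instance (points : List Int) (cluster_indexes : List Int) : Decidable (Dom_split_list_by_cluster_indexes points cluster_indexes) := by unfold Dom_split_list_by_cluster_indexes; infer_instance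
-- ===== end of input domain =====

-- B replaces A's single-pass grouping dict + deletion pass by a per-key gather: for each distinct
-- cluster index (first-appearance order) it rescans the whole list collecting that key's points
-- (objective: alternative; B trades A's single pass for a nested per-key scan).

-- ===== PORT A =====
-- body of A's first loop: if val not in clusters: clusters[val] = []; clusters[val].append(points[i])
-- (points[i], i ≥ 0 here, ported as pyGetD with default 0: exact under Pre_, every used i < points.length)
def pvStepA (points : List Int) (d : PySem.Dict Int (List Int)) (iv : Int × Int) : PySem.Dict Int (List Int) :=
  let d' := if d.contains iv.2 then d else d.insert iv.2 []
  d'.modify iv.2 [] (fun g => g ++ [PySem.List.pyGetD points iv.1 0])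

-- clusters after A's first loop
def pvClusters (points : List Int) (cluster_indexes : List Int) : PySem.Dict Int (List Int) :=
  (PySem.List.enumerate cluster_indexes).foldl (pvStepA points) PySem.Dict.empty

-- body of A's second loop: if len(clusters[key]) < 3: del clusters[key]
def pvEraseStep (d : PySem.Dict Int (List Int)) (k : Int) : PySem.Dict Int (List Int) :=
  if (d.getD k []).length < 3 then d.erase k else d

def split_list_by_cluster_indexes (points : List Int) (cluster_indexes : List Int) : List (Int × List Int) :=
  (((pvClusters points cluster_indexes).keys).foldl pvEraseStep (pvClusters points cluster_indexes)).items

-- ===== PORT B =====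
-- members = [points[i] for i, v in enumerate(cluster_indexes) if v == key]
def pvMembers (points : List Int) (cluster_indexes : List Int) (key : Int) : List Int :=
  ((PySem.List.enumerate cluster_indexes).filter (fun iv => iv.2 == key)).map
    (fun iv => PySem.List.pyGetD points iv.1 0)

-- for key in dict.fromkeys(cluster_indexes): if len(members) >= 3: result[key] = members
def split_list_by_cluster_indexes_alt (points : List Int) (cluster_indexes : List Int) : List (Int × List Int) :=
  ((PySem.List.dedup cluster_indexes).foldl
    (fun d key =>
      if 3 ≤ (pvMembers points cluster_indexes key).length then
        d.insert key (pvMembers points cluster_indexes key)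
      else d)
    PySem.Dict.empty).items

-- ===== PRECONDITION & SPEC =====
-- Pre_ excludes exactly the inputs where Python A raises IndexError (points[i] with len(points) < len(cluster_indexes))
def Pre_split_list_by_cluster_indexes (points : List Int) (cluster_indexes : List Int) : Prop :=
  cluster_indexes.length ≤ points.length
instance (points : List Int) (cluster_indexes : List Int) : Decidable (Pre_split_list_by_cluster_indexes points cluster_indexes) := by unfold Pre_split_list_by_cluster_indexes; infer_instance

def pvWitness_split_list_by_cluster_indexes : List Int × List Int := ([1, 2, 3], [0, 0, 0])

def Spec_split_list_by_cluster_indexes (points : List Int) (cluster_indexes : List Int) (out : List (Int × List Int)) : Prop := out = split_list_by_cluster_indexes_alt points cluster_indexes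
instance (points : List Int) (cluster_indexes : List Int) (out : List (Int × List Int)) : Decidable (Spec_split_list_by_cluster_indexes points cluster_indexes out) := by unfold Spec_split_list_by_cluster_indexes; infer_instance

-- ===== CLAIM (what is proved, stated in full; the proofs are below) =====
def Claim_equal_split_list_by_cluster_indexes : Prop := ∀ (points : List Int) (cluster_indexes : List Int), Dom_split_list_by_cluster_indexes points cluster_indexes → Pre_split_list_by_cluster_indexes points cluster_indexes → Spec_split_list_by_cluster_indexes points cluster_indexes (split_list_by_cluster_indexes points cluster_indexes)

-- ===== LEMMAS AND PROOFS =====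

-- the grouping step of A's first loop, processing (key, point) pairs
def pvIns (d : PySem.Dict Int (List Int)) (p : Int × Int) : PySem.Dict Int (List Int) :=
  d.insert p.1 (d.getD p.1 [] ++ [p.2])

lemma pvStepA_eq (points : List Int) (d : PySem.Dict Int (List Int)) (iv : Int × Int) :
    pvStepA points d iv = pvIns d (iv.2, PySem.List.pyGetD points iv.1 0) := by
  unfold pvStepA pvIns PySem.Dict.modify
  by_cases hc : d.contains iv.2 = true
  · simp [hc]
  · have hcf : d.contains iv.2 = false := by simpa using hc
    simp only [hcf, Bool.false_eq_true, if_false]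
    rw [PySem.Dict.getD_insert_self, PySem.Dict.insert_insert_self,
        PySem.Dict.getD_of_not_contains d _ hcf]

-- A's deletion loop is a filter of the items, for Nodup key lists
lemma pv_erase_loop (ks : List Int) :
    ∀ d : PySem.Dict Int (List Int), ks.Nodup → d.keys.Nodup →
      (ks.foldl pvEraseStep d).items =
        d.items.filter (fun kv => !(decide (kv.1 ∈ ks) && decide (kv.2.length < 3))) := by
  induction ks with
  | nil => intro d _ _; simp
  | cons k ks ih =>
    intro d hks hd
    have hknotin : k ∉ ks := (List.nodup_cons.mp hks).1
    have hks' : ks.Nodup := (List.nodup_cons.mp hks).2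
    simp only [List.foldl_cons]
    by_cases c : (d.getD k []).length < 3
    · have hstep : pvEraseStep d k = d.erase k := by unfold pvEraseStep; simp [c]
      have hitems : (d.erase k).items = d.items.filter (fun p => !(p.1 == k)) := rfl
      have hnd' : (d.erase k).keys.Nodup := by
        have hsub : (d.erase k).keys.Sublist d.keys := by
          show ((d.erase k).items.map (fun p => p.1)).Sublist (d.items.map (fun p => p.1))
          rw [hitems]
          exact List.Sublist.map _ List.filter_sublist
        exact List.Nodup.sublist hsub hd
      rw [hstep, ih _ hks' hnd', hitems, List.filter_filter]
      apply List.filter_congr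
      intro kv hkv
      by_cases hk : kv.1 = k
      · have hv : kv.2 = d.getD k [] := by
          rw [← hk]
          exact (PySem.Dict.getD_of_mem_items d (by simpa using hkv) hd []).symm
        simp [hk, hknotin, hv, c]
      · simp [hk]
    · have hstep : pvEraseStep d k = d := by unfold pvEraseStep; simp [c]
      rw [hstep, ih _ hks' hd]
      apply List.filter_congr
      intro kv hkv
      by_cases hk : kv.1 = k
      · have hv : kv.2 = d.getD k [] := by
          rw [← hk]
          exact (PySem.Dict.getD_of_mem_items d (by simpa using hkv) hd []).symm
        simp [hk, hknotin, hv, c]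
      · simp [hk]

-- ===== VERDICT (by name: the statement is the Claim_ definition above) =====
theorem split_list_by_cluster_indexes_spec : Claim_equal_split_list_by_cluster_indexes := by
  intro points cluster_indexes _ _
  unfold Spec_split_list_by_cluster_indexes
  unfold split_list_by_cluster_indexes split_list_by_cluster_indexes_alt
  set E := PySem.List.enumerate cluster_indexes with hE
  set M : List (Int × Int) := E.map (fun iv => (iv.2, PySem.List.pyGetD points iv.1 0)) with hM
  have hA : pvClusters points cluster_indexes = M.foldl pvIns PySem.Dict.empty := by
    unfold pvClusters
    rw [hM, List.foldl_map, ← hE]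
    exact PySem.List.foldl_congr_mem E _ _ _ (fun d iv _ => pvStepA_eq points d iv)
  set GA := M.foldl pvIns PySem.Dict.empty with hGA
  have hGAnodup : GA.keys.Nodup := by
    rw [hGA]
    exact PySem.Dict.nodup_keys_foldl_insert_key M Prod.fst
      (fun d p => d.getD p.1 [] ++ [p.2]) PySem.Dict.empty PySem.Dict.nodup_keys_empty
  -- keys of the grouping dict = first-appearance dedup of the cluster indexes
  have hMfst : M.map (fun p => p.1) = cluster_indexes := by
    rw [hM, List.map_map]
    exact PySem.List.map_snd_enumerate cluster_indexes 0
  have hkeys : GA.keys = PySem.List.dedup cluster_indexes := by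
    rw [hGA]
    show (M.foldl (fun d p => d.insert p.1 (d.getD p.1 [] ++ [p.2])) PySem.Dict.empty).keys = _
    rw [PySem.Dict.keys_foldl_insert_key M (fun p : Int × Int => p.1)
      (fun d p => d.getD p.1 [] ++ [p.2]) PySem.Dict.empty, hMfst]
    rfl
  -- per-key contents of the grouping dict = B's per-key gather
  have hget : ∀ k : Int, GA.getD k [] = pvMembers points cluster_indexes k := by
    intro k
    have hfold : M.foldl pvIns PySem.Dict.empty
        = M.foldl (fun d p => d.modify p.1 [] fun x => x ++ [p.2]) PySem.Dict.empty := rfl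
    rw [hGA, hfold, PySem.Dict.getD_foldl_modify_append]
    rw [hM, List.filter_map]
    unfold pvMembers
    rw [List.map_map, ← hE]
    rfl
  rw [hA, pv_erase_loop GA.keys GA hGAnodup hGAnodup]
  rw [PySem.Dict.items_eq_map_keys GA hGAnodup []]
  -- B's conditional-insert loop over distinct fresh keys
  have hB : (PySem.List.dedup cluster_indexes).foldl
      (fun d key =>
        if 3 ≤ (pvMembers points cluster_indexes key).length then
          d.insert key (pvMembers points cluster_indexes key)
        else d) PySem.Dict.empty
      = ((PySem.List.dedup cluster_indexes).filter
          (fun key => 3 ≤ (pvMembers points cluster_indexes key).length)).foldl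
          (fun d key => d.insert key (pvMembers points cluster_indexes key)) PySem.Dict.empty := by
    rw [List.foldl_filter]
    simp only [decide_eq_true_eq]
  rw [hB]
  rw [PySem.Dict.items_foldl_insert_fresh _ (fun key => key) _ _
    (fun a _ => PySem.Dict.contains_empty a)
    (by
      rw [List.map_id']
      exact (PySem.List.nodup_dedup cluster_indexes).filter _)]
  rw [List.filter_map]
  rw [show (PySem.Dict.empty : PySem.Dict Int (List Int)).items = [] from rfl, List.nil_append]
  rw [hkeys]
  -- align the filter predicates and the mapped values on keys of the dedup list
  have hfil : (PySem.List.dedup cluster_indexes).filter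
      (fun k => !(decide (k ∈ PySem.List.dedup cluster_indexes) &&
        decide ((GA.getD k []).length < 3)))
      = (PySem.List.dedup cluster_indexes).filter
          (fun key => 3 ≤ (pvMembers points cluster_indexes key).length) := by
    apply List.filter_congr
    intro k hk
    have hkm : k ∈ cluster_indexes := (PySem.List.mem_dedup cluster_indexes k).mp hk
    rw [hget k]
    simp [hkm]
    rw [← decide_not]
    exact decide_eq_decide.mpr (by omega)
  rw [← hkeys] at hfil ⊢
  rw [show (fun kv : Int × List Int => !(decide (kv.1 ∈ GA.keys) && decide (kv.2.length < 3)))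
      ∘ (fun k => (k, GA.getD k [])) =
      fun k => !(decide (k ∈ GA.keys) && decide ((GA.getD k []).length < 3)) from rfl]
  rw [hkeys] at hfil ⊢
  rw [hfil]
  apply List.map_congr_left
  intro k hk
  have hk' : k ∈ PySem.List.dedup cluster_indexes := (List.mem_filter.mp hk).1
  rw [hget k]
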